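-- pv_equiv track=rewrite | github.com/amlight/ofp_sniffer | libs/openflow/of13/prints.py | parse_bitmask
-- ===== SOURCE A (Python) =====
-- def parse_bitmask(bitmask, array):
--     size = len(array)
--     for i in range(0, size):
--         mask = 2**i
--         aux = bitmask & mask
--         if aux == 0:
--             try:
--                 array.remove(mask)
--             except ValueError:
--                 pass
--     return array
-- ===== SOURCE B (Python) =====
-- def parse_bitmask(bitmask, array):
--     remove = {2 ** i for i in range(len(array)) if bitmask & (2 ** i) == 0}
--     kept = []
--     for x in array:
--         if x in remove:
--             remove.discard(x)
--         else:
--             kept.append(x)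
--     array[:] = kept
--     return array
-- ===== Notes on version B (the rewrite author's own statement) =====
-- stated objective: faster
-- what changed: B precomputes the set of powers 2**i whose bit is unset and makes a single pass over the array elements, dropping at most one occurrence per power (discarding the power from the set once used), then writes back via array[:]; A instead calls array.remove once per bit index, rescanning the list each time.
import Mathlib
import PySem

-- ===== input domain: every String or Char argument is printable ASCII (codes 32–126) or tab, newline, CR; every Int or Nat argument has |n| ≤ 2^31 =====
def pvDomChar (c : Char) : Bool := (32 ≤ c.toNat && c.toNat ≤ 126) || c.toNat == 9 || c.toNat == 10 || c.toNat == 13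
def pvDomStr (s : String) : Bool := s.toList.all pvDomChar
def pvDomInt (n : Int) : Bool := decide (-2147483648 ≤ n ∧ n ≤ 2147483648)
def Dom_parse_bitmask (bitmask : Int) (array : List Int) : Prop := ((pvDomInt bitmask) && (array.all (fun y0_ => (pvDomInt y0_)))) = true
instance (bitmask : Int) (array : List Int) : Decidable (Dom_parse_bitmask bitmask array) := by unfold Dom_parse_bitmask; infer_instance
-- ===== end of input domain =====

-- B replaces A's per-bit array.remove rescans by one precomputed set of unset-bit powers and a
-- single pass over the array (faster); both mutate the list in place in Python and the final
-- contents agree, the equivalence proved here is about the returned/final list value.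

-- ===== PORT A =====
-- i ranges over range(0, size) so 0 ≤ i and 2**i is ported exactly as 2 ^ i.toNat
def parse_bitmask (bitmask : Int) (array : List Int) : List Int :=
  (PySem.List.pyRange 0 (array.length : Int) 1).foldl
    (fun arr i =>
      let mask : Int := 2 ^ i.toNat
      let aux : Int := PySem.Int.band bitmask mask
      if aux = 0 then
        -- try: array.remove(mask) except ValueError: pass
        match PySem.List.remove? arr mask with
        | some arr' => arr'
        | none => arr
      else arr)
    array

-- ===== PORT B =====
def parse_bitmask_alt (bitmask : Int) (array : List Int) : List Int :=
  -- remove = {2**i for i in range(len(array)) if bitmask & 2**i == 0}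
  let remove : PySem.Set Int :=
    (PySem.List.pyRange 0 (array.length : Int) 1).foldl
      (fun s i => if PySem.Int.band bitmask (2 ^ i.toNat) = 0 then PySem.Set.add s (2 ^ i.toNat) else s)
      PySem.Set.empty
  -- single pass: kept grows, remove shrinks; array[:] = kept; return array
  (array.foldl
    (fun (st : List Int × PySem.Set Int) x =>
      if PySem.Set.contains st.2 x then (st.1, PySem.Set.discard st.2 x)
      else (st.1 ++ [x], st.2))
    ([], remove)).1

-- ===== PRECONDITION & SPEC =====
def Spec_parse_bitmask (bitmask : Int) (array : List Int) (out : List Int) : Prop := out = parse_bitmask_alt bitmask array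
instance (bitmask : Int) (array : List Int) (out : List Int) : Decidable (Spec_parse_bitmask bitmask array out) := by unfold Spec_parse_bitmask; infer_instance

-- ===== CLAIM (what is proved, stated in full; the proofs are below) =====
def Claim_equal_parse_bitmask : Prop := ∀ (bitmask : Int) (array : List Int), Dom_parse_bitmask bitmask array → Spec_parse_bitmask bitmask array (parse_bitmask bitmask array)

-- ===== LEMMAS AND PROOFS =====

-- remove first occurrence of v, or leave the list alone (A's try/except around array.remove)
def removeOnce (v : Int) (a : List Int) : List Int :=
  match PySem.List.remove? a v with
  | some r => r
  | none => a

-- A's whole loop, rephrased as a fold of removeOnce over an explicit list of masks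
def remAll (S : List Int) (arr : List Int) : List Int :=
  S.foldl (fun a v => removeOnce v a) arr

-- B's single pass, as a structural recursion
def passRem (S : PySem.Set Int) : List Int → List Int
  | [] => []
  | x :: t => if PySem.Set.contains S x then passRem (PySem.Set.discard S x) t else x :: passRem S t

-- a conditional fold is the fold over the filtered, mapped list
theorem foldl_if_filter_map {α : Type} (p : Int → Prop) [DecidablePred p] (g : Int → Int) (f : α → Int → α) :
    ∀ (l : List Int) (st : α),
      l.foldl (fun a i => if p i then f a (g i) else a) st
        = ((l.filter (fun i => decide (p i))).map g).foldl f st := by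
  intro l
  induction l with
  | nil => intro st; rfl
  | cons hd tl ih =>
    intro st
    by_cases hp : p hd
    · simp [List.foldl, hp, ih]
    · simp [List.foldl, hp, ih]

theorem removeOnce_cons_of_ne {x v : Int} (h : x ≠ v) (t : List Int) :
    removeOnce v (x :: t) = x :: removeOnce v t := by
  unfold removeOnce
  rw [PySem.List.remove?_cons_of_ne t h]
  cases PySem.List.remove? t v <;> simp

theorem remAll_nil (S : List Int) : remAll S [] = [] := by
  induction S with
  | nil => rfl
  | cons v S ih => simpa [remAll, removeOnce, PySem.List.remove?] using ih

theorem remAll_cons_not_mem {x : Int} (S : List Int) (hx : x ∉ S) :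
    ∀ t, remAll S (x :: t) = x :: remAll S t := by
  induction S with
  | nil => intro t; rfl
  | cons v S ih =>
    intro t
    have hvx : x ≠ v := fun h => hx (by simp [h])
    have hxS : x ∉ S := fun h => hx (List.mem_cons_of_mem _ h)
    show remAll S (removeOnce v (x :: t)) = x :: remAll S (removeOnce v t)
    rw [removeOnce_cons_of_ne hvx, ih hxS]

theorem remAll_cons_mem {x : Int} (S : List Int) (hnd : S.Nodup) (hx : x ∈ S) :
    ∀ t, remAll S (x :: t) = remAll (PySem.Set.discard S x) t := by
  induction S with
  | nil => cases hx
  | cons v S ih =>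
    intro t
    rcases List.nodup_cons.mp hnd with ⟨hvS, hndS⟩
    by_cases hvx : v = x
    · subst hvx
      have hall : ∀ y ∈ S, (!(y == v)) = true := by
        intro y hy
        simp only [Bool.not_eq_eq_eq_not, Bool.not_true, beq_eq_false_iff_ne]
        exact fun h => hvS (h ▸ hy)
      have hdis : PySem.Set.discard (v :: S) v = S := by
        simp [PySem.Set.discard, List.filter_eq_self.mpr hall]
      rw [hdis]
      show remAll S (removeOnce v (v :: t)) = remAll S t
      rw [show removeOnce v (v :: t) = t by simp [removeOnce, PySem.List.remove?_cons_self]]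
    · have hxS : x ∈ S := by
        rcases List.mem_cons.mp hx with h | h
        · exact absurd h.symm hvx
        · exact h
      have hxv : x ≠ v := fun h => hvx h.symm
      have hdis : PySem.Set.discard (v :: S) x = v :: PySem.Set.discard S x := by
        simp [PySem.Set.discard, hvx]
      rw [hdis]
      show remAll S (removeOnce v (x :: t)) = remAll (PySem.Set.discard S x) (removeOnce v t)
      rw [removeOnce_cons_of_ne hxv, ih hndS hxS]

theorem remAll_eq_passRem : ∀ (arr : List Int) (S : List Int), S.Nodup →
    remAll S arr = passRem S arr := by
  intro arr
  induction arr with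
  | nil => intro S _; rw [remAll_nil]; rfl
  | cons x t ih =>
    intro S hnd
    by_cases hx : x ∈ S
    · rw [remAll_cons_mem S hnd hx t, passRem,
          if_pos ((PySem.Set.contains_iff S x).mpr hx)]
      exact ih _ (PySem.Set.nodup_discard S x hnd)
    · have hc : ¬ (PySem.Set.contains S x = true) :=
        fun h => hx ((PySem.Set.contains_iff S x).mp h)
      rw [remAll_cons_not_mem S hx t, passRem, if_neg hc, ih S hnd]

-- B's fold accumulates: first component is acc ++ passRem S arr
theorem foldl_pass (arr : List Int) : ∀ (S : PySem.Set Int) (acc : List Int),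
    (arr.foldl
      (fun (st : List Int × PySem.Set Int) x =>
        if PySem.Set.contains st.2 x then (st.1, PySem.Set.discard st.2 x)
        else (st.1 ++ [x], st.2))
      (acc, S)).1 = acc ++ passRem S arr := by
  induction arr with
  | nil => intro S acc; simp [passRem]
  | cons x t ih =>
    intro S acc
    simp only [List.foldl_cons]
    by_cases h : PySem.Set.contains S x = true
    · rw [if_pos h, ih, passRem, if_pos h]
    · rw [if_neg h, ih, passRem, if_neg h]
      simp

-- the list of masks both versions effectively work with
def maskList (bitmask : Int) (n : Nat) : List Int :=
  (((PySem.List.pyRange 0 (n : Int) 1).filter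
      (fun i => decide (PySem.Int.band bitmask (2 ^ i.toNat) = 0))).map
    (fun i => (2 : Int) ^ i.toNat))

theorem nodup_maskList (bitmask : Int) (n : Nat) : (maskList bitmask n).Nodup := by
  unfold maskList
  apply List.Nodup.map_on
  · intro i hi j hj hij
    have hi' := PySem.List.mem_pyRange_one.mp (List.mem_of_mem_filter hi)
    have hj' := PySem.List.mem_pyRange_one.mp (List.mem_of_mem_filter hj)
    have hnat : (2 : Nat) ^ i.toNat = 2 ^ j.toNat := by exact_mod_cast hij
    have := Nat.pow_right_injective (le_refl 2) hnat
    omega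
  · exact (PySem.List.nodup_pyRange_one 0 (n : Int)).filter _

theorem parse_bitmask_eq_remAll (bitmask : Int) (array : List Int) :
    parse_bitmask bitmask array = remAll (maskList bitmask array.length) array := by
  exact foldl_if_filter_map
    (fun i => PySem.Int.band bitmask (2 ^ i.toNat) = 0)
    (fun i => (2 : Int) ^ i.toNat)
    (fun a v => removeOnce v a)
    (PySem.List.pyRange 0 (array.length : Int) 1) array

theorem parse_bitmask_alt_eq_passRem (bitmask : Int) (array : List Int) :
    parse_bitmask_alt bitmask array = passRem (maskList bitmask array.length) array := by
  unfold parse_bitmask_alt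
  have hset :
      ((PySem.List.pyRange 0 (array.length : Int) 1).foldl
        (fun s i => if PySem.Int.band bitmask (2 ^ i.toNat) = 0 then PySem.Set.add s (2 ^ i.toNat) else s)
        PySem.Set.empty)
      = maskList bitmask array.length := by
    have h : ((PySem.List.pyRange 0 (array.length : Int) 1).foldl
        (fun s i => if PySem.Int.band bitmask (2 ^ i.toNat) = 0 then PySem.Set.add s (2 ^ i.toNat) else s)
        PySem.Set.empty) = PySem.Set.ofList (maskList bitmask array.length) :=
      foldl_if_filter_map
        (fun i => PySem.Int.band bitmask (2 ^ i.toNat) = 0)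
        (fun i => (2 : Int) ^ i.toNat)
        (fun s v => PySem.Set.add s v)
        (PySem.List.pyRange 0 (array.length : Int) 1) PySem.Set.empty
    rw [h, PySem.Set.ofList_eq_self_of_nodup _ (nodup_maskList bitmask array.length)]
  rw [hset]
  simpa using foldl_pass array (maskList bitmask array.length) []

-- ===== VERDICT (by name: the statement is the Claim_ definition above) =====
theorem parse_bitmask_spec : Claim_equal_parse_bitmask := by
  intro bitmask array _
  unfold Spec_parse_bitmask
  rw [parse_bitmask_eq_remAll, parse_bitmask_alt_eq_passRem]
  exact remAll_eq_passRem array _ (nodup_maskList bitmask array.length)
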